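-- pv_equiv track=rewrite | github.com/Jeffdude/Parcae | ProceduralGen.py | getProperDimensions
-- ===== SOURCE A (Python) =====
-- def getProperDimensions(worldWidth, worldHeight):
--     tempWidth = 1
--     tempHeight = 1
--     while tempWidth < worldWidth - 1:
--         tempWidth <<= 1
--     while tempHeight < worldHeight - 1:
--         tempHeight <<= 1
--     return (tempWidth + 1, tempHeight + 1)
-- ===== SOURCE B (Python) =====
-- def getProperDimensions(worldWidth, worldHeight):
--     newWidth = (1 << max(worldWidth - 2, 0).bit_length()) + 1
--     newHeight = (1 << max(worldHeight - 2, 0).bit_length()) + 1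
--     return (newWidth, newHeight)
-- ===== Notes on version B (the rewrite author's own statement) =====
-- stated objective: faster
-- what changed: Replaced each doubling while-loop with a closed-form bit_length computation: the smallest power of two >= n-1 is 1 << (n-2).bit_length() (clamped at 0), so both dimensions are computed by O(1) arithmetic with no loop.
import Mathlib
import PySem

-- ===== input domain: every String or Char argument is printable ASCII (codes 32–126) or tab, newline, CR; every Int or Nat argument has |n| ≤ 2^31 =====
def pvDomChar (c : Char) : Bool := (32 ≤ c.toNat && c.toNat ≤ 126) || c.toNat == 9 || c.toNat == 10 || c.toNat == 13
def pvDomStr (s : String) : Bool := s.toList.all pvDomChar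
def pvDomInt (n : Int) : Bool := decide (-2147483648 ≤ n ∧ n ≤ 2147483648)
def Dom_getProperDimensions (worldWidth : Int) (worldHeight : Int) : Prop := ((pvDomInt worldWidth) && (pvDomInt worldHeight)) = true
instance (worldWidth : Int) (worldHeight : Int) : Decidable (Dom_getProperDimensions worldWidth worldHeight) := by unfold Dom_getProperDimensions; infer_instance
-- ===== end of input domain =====

-- B replaces the two doubling loops by a closed-form bit-length computation (O(1) arithmetic, no loop).

-- ===== PORT A =====
-- the while-loop `while temp < n - 1: temp <<= 1`; the `0 < temp` conjunct is a
-- totality guard only: the loop is always entered with temp = 1 and doubling keeps it positive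
def pvLoopA (n temp : Int) : Int :=
  if h : 0 < temp ∧ temp < n - 1 then pvLoopA n (2 * temp) else temp
termination_by (n - 1 - temp).toNat
decreasing_by
  omega

def getProperDimensions (worldWidth : Int) (worldHeight : Int) : Int × Int :=
  (pvLoopA worldWidth 1 + 1, pvLoopA worldHeight 1 + 1)

-- ===== PORT B =====
-- max(n - 2, 0).bit_length() is ported as Nat.size of the clamped value (exact for nonnegative ints)
def getProperDimensions_alt (worldWidth : Int) (worldHeight : Int) : Int × Int :=
  ((2 : Int) ^ Nat.size (max (worldWidth - 2) 0).toNat + 1,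
   (2 : Int) ^ Nat.size (max (worldHeight - 2) 0).toNat + 1)

-- ===== PRECONDITION & SPEC =====
def Spec_getProperDimensions (worldWidth : Int) (worldHeight : Int) (out : Int × Int) : Prop := out = getProperDimensions_alt worldWidth worldHeight
instance (worldWidth : Int) (worldHeight : Int) (out : Int × Int) : Decidable (Spec_getProperDimensions worldWidth worldHeight out) := by unfold Spec_getProperDimensions; infer_instance

-- ===== CLAIM (what is proved, stated in full; the proofs are below) =====
def Claim_equal_getProperDimensions : Prop := ∀ (worldWidth : Int) (worldHeight : Int), Dom_getProperDimensions worldWidth worldHeight → Spec_getProperDimensions worldWidth worldHeight (getProperDimensions worldWidth worldHeight)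

-- ===== LEMMAS AND PROOFS =====
theorem pvLoopA_stop (n temp : Int) (h : ¬ (0 < temp ∧ temp < n - 1)) : pvLoopA n temp = temp := by
  rw [pvLoopA]; simp [h]

theorem pvLoopA_step (n temp : Int) (h : 0 < temp ∧ temp < n - 1) :
    pvLoopA n temp = pvLoopA n (2 * temp) := by
  rw [pvLoopA]; simp [h]

theorem pvLoopA_pow (n : Int) (x : Nat) (hnx : n - 2 = (x : Int)) :
    ∀ d k, Nat.size x - k = d → k ≤ Nat.size x → pvLoopA n ((2 : Int) ^ k) = 2 ^ Nat.size x := by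
  intro d
  induction d with
  | zero =>
    intro k hd hk
    have hk' : k = Nat.size x := by omega
    subst hk'
    apply pvLoopA_stop
    have hx : x < 2 ^ Nat.size x := Nat.lt_size_self x
    have hx' : (x : Int) < (2 : Int) ^ Nat.size x := by exact_mod_cast hx
    intro ⟨_, h2⟩; omega
  | succ d ih =>
    intro k hd hk
    have hklt : k < Nat.size x := by omega
    have hle : 2 ^ k ≤ x := Nat.lt_size.mp hklt
    have hle' : (2 : Int) ^ k ≤ (x : Int) := by exact_mod_cast hle
    have hpos : (0 : Int) < 2 ^ k := by positivity
    rw [pvLoopA_step n _ ⟨hpos, by omega⟩]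
    have h2 : (2 : Int) * 2 ^ k = 2 ^ (k + 1) := by ring
    rw [h2]
    exact ih (k + 1) (by omega) (by omega)

theorem pvLoopA_closed (n : Int) : pvLoopA n 1 = (2 : Int) ^ Nat.size (max (n - 2) 0).toNat := by
  by_cases hn : n ≤ 2
  · have hx : (max (n - 2) 0).toNat = 0 := by omega
    rw [hx]
    simpa [Nat.size_zero] using pvLoopA_stop n 1 (by intro ⟨_, h2⟩; omega)
  · have hnx : n - 2 = ((max (n - 2) 0).toNat : Int) := by omega
    have := pvLoopA_pow n (max (n - 2) 0).toNat hnx (Nat.size (max (n - 2) 0).toNat) 0 (by omega) (by omega)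
    simpa using this

-- ===== VERDICT (by name: the statement is the Claim_ definition above) =====
theorem getProperDimensions_spec : Claim_equal_getProperDimensions := by
  intro w h _
  unfold Spec_getProperDimensions getProperDimensions getProperDimensions_alt
  rw [pvLoopA_closed, pvLoopA_closed]
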